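-- pv_equiv track=rewrite | github.com/GeorgeMugale/recruitment-2026-fullstack | app/utils.py | find_province_by_constituency
-- ===== SOURCE A (Python) =====
-- def find_province_by_constituency(
--     data: dict[str, list[str]],
--     constituency_name: str
-- ) -> str | None:
--     """
--     Given scraped data and a constituency name,
--     return the province it belongs to.
--
--     Case-insensitive.
--
--     Returns:
--         province name if found, otherwise None
--     """
--     # lower case to make query case-insensitive
--     search_term = constituency_name.lower()
--
--     # loop through each dictionary item (Key=Province, Value=List of Constituencies)
--     for province, constituencies in data.items():
--         # loop through the list of constituencies for this specific province
--         for constituency in constituencies: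
--             # case-insensitive compare
--             if constituency.lower() == search_term:
--                 return province
--
--     return None
-- ===== SOURCE B (Python) =====
-- def find_province_by_constituency(
--     data: dict[str, list[str]],
--     constituency_name: str
-- ) -> str | None:
--     # Build a lowercase-constituency -> province index once (setdefault keeps
--     # the earliest province for a duplicate name, matching first-match order),
--     # then answer with a single dictionary lookup.
--     index = {}
--     for province, constituencies in data.items():
--         for constituency in constituencies:
--             index.setdefault(constituency.lower(), province)
--     return index.get(constituency_name.lower())
-- ===== Notes on version B (the rewrite author's own statement) =====
-- stated objective: alternative
-- what changed: Replaces A's nested early-exit scan with an eagerly built lowercase->province dict index (setdefault, so the first matching pair wins) followed by a single lookup.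
import Mathlib
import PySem

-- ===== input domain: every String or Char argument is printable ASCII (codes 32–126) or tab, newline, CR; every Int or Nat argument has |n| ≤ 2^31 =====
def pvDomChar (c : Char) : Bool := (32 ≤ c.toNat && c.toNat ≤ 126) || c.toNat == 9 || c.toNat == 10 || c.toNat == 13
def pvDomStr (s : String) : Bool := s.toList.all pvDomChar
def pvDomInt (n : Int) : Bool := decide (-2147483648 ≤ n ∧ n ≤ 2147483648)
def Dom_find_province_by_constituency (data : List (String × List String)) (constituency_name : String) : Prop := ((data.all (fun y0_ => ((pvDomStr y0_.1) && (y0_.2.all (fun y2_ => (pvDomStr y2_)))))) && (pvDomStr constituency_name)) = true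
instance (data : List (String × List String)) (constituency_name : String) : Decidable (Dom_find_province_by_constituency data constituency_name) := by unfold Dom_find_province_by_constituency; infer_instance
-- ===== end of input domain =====

-- B builds a lowercase->province index dict once (setdefault: first match wins) and does one lookup,
-- instead of A's nested early-exit scan; same cost, different decomposition (objective: alternative).

-- ===== PORT A =====
-- the nested for-loops with early return: scan provinces, return the first whose list
-- contains a case-insensitive match (List.any is the inner loop's early-exit scan)
def pvScanA (search : String) : List (String × List String) → Option String
  | [] => none
  | (p, cs) :: rest =>
      if cs.any (fun c => PySem.Str.lower c == search) then some p else pvScanA search rest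

def find_province_by_constituency (data : List (String × List String)) (constituency_name : String) : Option String :=
  pvScanA (PySem.Str.lower constituency_name) data

-- ===== PORT B =====
-- index = {}; for province, cs in data.items(): for c in cs: index.setdefault(c.lower(), province)
def pvIndexB (data : List (String × List String)) : PySem.Dict String String :=
  data.foldl
    (fun d pc => pc.2.foldl (fun d c => d.setdefault (PySem.Str.lower c) pc.1) d)
    PySem.Dict.empty

def find_province_by_constituency_alt (data : List (String × List String)) (constituency_name : String) : Option String :=
  (pvIndexB data).get? (PySem.Str.lower constituency_name)

-- ===== PRECONDITION & SPEC =====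
def Spec_find_province_by_constituency (data : List (String × List String)) (constituency_name : String) (out : Option String) : Prop := out = find_province_by_constituency_alt data constituency_name
instance (data : List (String × List String)) (constituency_name : String) (out : Option String) : Decidable (Spec_find_province_by_constituency data constituency_name out) := by unfold Spec_find_province_by_constituency; infer_instance

-- ===== CLAIM (what is proved, stated in full; the proofs are below) =====
def Claim_equal_find_province_by_constituency : Prop := ∀ (data : List (String × List String)) (constituency_name : String), Dom_find_province_by_constituency data constituency_name → Spec_find_province_by_constituency data constituency_name (find_province_by_constituency data constituency_name)

-- ===== LEMMAS AND PROOFS =====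

-- inner loop: looking up k after setdefault-ing every lowered constituency of one province
lemma pv_inner (cs : List String) (p k : String) (d : PySem.Dict String String) :
    (cs.foldl (fun d c => d.setdefault (PySem.Str.lower c) p) d).get? k
      = (d.get? k).or (if cs.any (fun c => PySem.Str.lower c == k) then some p else none) := by
  induction cs generalizing d with
  | nil => cases hd : d.get? k <;> simp [hd, Option.or]
  | cons c cs ih =>
    simp only [List.foldl_cons, List.any_cons]
    rw [ih]
    by_cases h : PySem.Str.lower c = k
    · subst h
      rw [PySem.Dict.get?_setdefault_self]
      cases d.get? (PySem.Str.lower c) <;> simp [Option.or]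
    · rw [PySem.Dict.get?_setdefault_of_ne _ _ (fun hk => h hk.symm)]
      simp [beq_iff_eq, h]

-- outer loop: looking up k in the index built over 'rest' starting from dict d
lemma pv_outer (rest : List (String × List String)) (k : String) (d : PySem.Dict String String) :
    (rest.foldl
        (fun d pc => pc.2.foldl (fun d c => d.setdefault (PySem.Str.lower c) pc.1) d) d).get? k
      = (d.get? k).or (pvScanA k rest) := by
  induction rest generalizing d with
  | nil => cases hd : d.get? k <;> simp [hd, pvScanA, Option.or]
  | cons pc rest ih =>
    obtain ⟨p, cs⟩ := pc
    simp only [List.foldl_cons]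
    rw [ih, pv_inner]
    simp only [pvScanA]
    cases d.get? k <;> [skip; simp [Option.or]]
    split <;> simp [Option.or]

-- ===== VERDICT (by name: the statement is the Claim_ definition above) =====
theorem find_province_by_constituency_spec : Claim_equal_find_province_by_constituency := by
  intro data name _
  show _ = _
  unfold find_province_by_constituency find_province_by_constituency_alt pvIndexB
  rw [pv_outer]
  simp [PySem.Dict.get?_empty, Option.or]
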